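-- pv_equiv track=rewrite | github.com/RideGreg/LeetCode | Python/number-of-atoms.py | countOfAtoms2
-- ===== SOURCE A (Python) =====
-- import collections
--
-- def countOfAtoms2(formula):
--     N = len(formula)
--     stack = [collections.Counter()]
--     i = 0
--     while i < N:
--         if formula[i] == '(':
--             stack.append(collections.Counter())
--             i += 1
--         elif formula[i] == ')':
--             top = stack.pop()
--             i += 1
--             i_start = i
--             while i < N and formula[i].isdigit(): i += 1
--             multiplicity = int(formula[i_start: i] or 1)
--             for name, v in top.items():
--                 stack[-1][name] += v * multiplicity
--         else:
--             i_start = i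
--             i += 1
--             while i < N and formula[i].islower(): i += 1
--             name = formula[i_start: i]
--             i_start = i
--             while i < N and formula[i].isdigit(): i += 1
--             multiplicity = int(formula[i_start: i] or 1)
--             stack[-1][name] += multiplicity
--
--     return "".join(name + (str(stack[-1][name]) if stack[-1][name] > 1 else '')
--                    for name in sorted(stack[-1]))
-- ===== SOURCE B (Python) =====
-- def countOfAtoms2(formula):
--     N = len(formula)
--
--     def parse(i):
--         # scan from i until ')' or end of string; return (counts, index of ')' or N)
--         counts = {}
--         while i < N and formula[i] != ')':
--             if formula[i] == '(':
--                 inner, i = parse(i + 1)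
--                 if i < N:
--                     i += 1  # step over the closing ')'
--                 j = i
--                 while j < N and formula[j].isdigit(): j += 1
--                 multiplicity = int(formula[i:j] or 1)
--                 i = j
--                 for name, v in inner.items():
--                     counts[name] = counts.get(name, 0) + v * multiplicity
--             else:
--                 j = i + 1
--                 while j < N and formula[j].islower(): j += 1
--                 name = formula[i:j]
--                 i = j
--                 while j < N and formula[j].isdigit(): j += 1
--                 multiplicity = int(formula[i:j] or 1)
--                 i = j
--                 counts[name] = counts.get(name, 0) + multiplicity
--         return counts, i
--
--     counts, _ = parse(0)
--     return "".join(name + (str(counts[name]) if counts[name] > 1 else '')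
--                    for name in sorted(counts))
-- ===== Notes on version B (the rewrite author's own statement) =====
-- stated objective: alternative
-- what changed: Replaces A's explicit list-of-Counters stack machine with a recursive-descent parser: a parse(i) helper builds each group's counts by scanning until ')' or end, recursing on '(' and merging the inner counts scaled by the trailing multiplier on return.
-- outside the precondition, e.g. on countOfAtoms2('(H(O'): A returns 'O', B returns 'HO'; on countOfAtoms2(')'): A raises IndexError, B returns ''; on countOfAtoms2('('): A returns '', B returns ''
import Mathlib
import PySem

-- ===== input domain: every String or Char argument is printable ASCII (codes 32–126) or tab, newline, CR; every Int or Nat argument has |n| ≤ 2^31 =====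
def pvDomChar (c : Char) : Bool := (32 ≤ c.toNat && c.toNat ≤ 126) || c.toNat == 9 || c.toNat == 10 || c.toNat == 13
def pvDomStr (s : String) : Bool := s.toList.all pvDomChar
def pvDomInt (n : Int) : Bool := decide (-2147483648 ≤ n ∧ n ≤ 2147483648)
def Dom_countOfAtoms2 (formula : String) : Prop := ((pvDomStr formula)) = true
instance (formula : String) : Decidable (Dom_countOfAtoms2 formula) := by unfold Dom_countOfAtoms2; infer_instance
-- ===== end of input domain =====

-- B re-implements A's explicit list-of-Counters stack machine as a recursive-descent parser
-- (objective: alternative); return values proved equal on balanced formulas.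

-- helpers shared by both ports: the Python idioms `counter[name] += v`,
-- `int(s or 1)` and the final sorted join, written once
def pvAdd (d : PySem.Dict String Int) (n : String) (v : Int) : PySem.Dict String Int :=
  d.insert n (d.getD n 0 + v)

-- `for name, v in top.items(): dst[name] += v * m`
def pvMerge (low top : PySem.Dict String Int) (m : Int) : PySem.Dict String Int :=
  top.items.foldl (fun st p => pvAdd st p.1 (p.2 * m)) low

-- `int(ds or 1)` for a scanned digit run ds
def pvMult (ds : List Char) : Int := (PySem.Int.ofChars? ds).getD 1

-- `"".join(name + (str(d[name]) if d[name] > 1 else '') for name in sorted(d))`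
def pvFormat (d : PySem.Dict String Int) : String :=
  PySem.Str.join "" ((PySem.List.sorted d.keys (fun s => s.toList) false).map
    (fun n => n ++ (if 1 < d.getD n 0 then PySem.Int.toStr (d.getD n 0) else "")))

-- ===== PORT A =====
-- A's while-loop over i with an explicit stack of Counters; the stack is kept top-first
-- (head = Python's stack[-1]); fuel = number of remaining characters bounds the loop
def loopA : Nat → List (PySem.Dict String Int) → List Char → List (PySem.Dict String Int)
  | 0, stack, _ => stack
  | _ + 1, stack, [] => stack
  | fuel + 1, stack, c :: rest =>
    if c = '(' then
      loopA fuel (PySem.Dict.empty :: stack) rest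
    else if c = ')' then
      match stack with
      | [] => []  -- Python: stack.pop() raises IndexError (outside Pre_)
      | top :: stack' =>
        let ds := rest.takeWhile PySem.Chars.isdigit
        let rest2 := rest.dropWhile PySem.Chars.isdigit
        match stack' with
        | [] =>  -- Python: stack[-1] raises IndexError unless top has no items (outside Pre_)
          if top.items.isEmpty then loopA fuel [] rest2 else []
        | low :: below => loopA fuel (pvMerge low top (pvMult ds) :: below) rest2
    else
      let ls := rest.takeWhile PySem.Chars.islower
      let rest1 := rest.dropWhile PySem.Chars.islower
      let name := String.ofList (c :: ls)
      let ds := rest1.takeWhile PySem.Chars.isdigit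
      let rest2 := rest1.dropWhile PySem.Chars.isdigit
      match stack with
      | [] => []  -- Python: stack[-1] raises IndexError (outside Pre_)
      | top :: stack' => loopA fuel (pvAdd top name (pvMult ds) :: stack') rest2

def countOfAtoms2 (formula : String) : String :=
  match loopA formula.toList.length [PySem.Dict.empty] formula.toList with
  | [] => ""  -- Python: stack[-1] raises IndexError (outside Pre_)
  | top :: _ => pvFormat top

-- ===== PORT B =====
-- B's parse(i): scan from i until ')' or end, recursing on '('; returns (counts, rest)
-- where rest starts at the ')' (or is empty); fuel bounds the recursion
def loopB : Nat → PySem.Dict String Int → List Char → PySem.Dict String Int × List Char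
  | 0, counts, l => (counts, l)  -- fuel exhausted; never reached with fuel ≥ l.length
  | _ + 1, counts, [] => (counts, [])
  | fuel + 1, counts, c :: rest =>
    if c = ')' then (counts, c :: rest)
    else if c = '(' then
      let inner := loopB fuel PySem.Dict.empty rest
      let rem1 := if inner.2.isEmpty then inner.2 else inner.2.tail  -- `if i < N: i += 1`
      let ds := rem1.takeWhile PySem.Chars.isdigit
      let rem2 := rem1.dropWhile PySem.Chars.isdigit
      loopB fuel (pvMerge counts inner.1 (pvMult ds)) rem2
    else
      let ls := rest.takeWhile PySem.Chars.islower
      let rest1 := rest.dropWhile PySem.Chars.islower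
      let name := String.ofList (c :: ls)
      let ds := rest1.takeWhile PySem.Chars.isdigit
      let rest2 := rest1.dropWhile PySem.Chars.isdigit
      loopB fuel (pvAdd counts name (pvMult ds)) rest2

def countOfAtoms2_alt (formula : String) : String :=
  pvFormat (loopB formula.toList.length PySem.Dict.empty formula.toList).1

-- ===== PRECONDITION & SPEC =====
-- running parenthesis balance of a character list
def pvBal (l : List Char) : Int := (l.count '(' : Int) - (l.count ')' : Int)

-- Pre_ excludes formulas whose parentheses are unbalanced: on a stray ')' A raises
-- IndexError, and a formula with an unclosed '(' is not a chemical formula at all, so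
-- neither output is specified there: A reports only the innermost open group while B
-- merges everything scanned, readings that sometimes agree and sometimes differ (see cites).
def Pre_countOfAtoms2 (formula : String) : Prop :=
  pvBal formula.toList = 0 ∧
    ∀ j, j < formula.toList.length + 1 → 0 ≤ pvBal (formula.toList.take j)
instance (formula : String) : Decidable (Pre_countOfAtoms2 formula) := by
  unfold Pre_countOfAtoms2; infer_instance

def pvWitness_countOfAtoms2 : String := "K4(ON(SO3)2)2"

def Spec_countOfAtoms2 (formula : String) (out : String) : Prop := out = countOfAtoms2_alt formula
instance (formula : String) (out : String) : Decidable (Spec_countOfAtoms2 formula out) := by unfold Spec_countOfAtoms2; infer_instance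

-- ===== CLAIM (what is proved, stated in full; the proofs are below) =====
def Claim_equal_countOfAtoms2 : Prop := ∀ (formula : String), Dom_countOfAtoms2 formula → Pre_countOfAtoms2 formula → Spec_countOfAtoms2 formula (countOfAtoms2 formula)

-- ===== LEMMAS AND PROOFS =====

-- evaluation shapes of the two loops
lemma loopA_nil (fuel : Nat) (stack : List (PySem.Dict String Int)) :
    loopA fuel stack [] = stack := by cases fuel <;> rfl

lemma loopB_nil (fuel : Nat) (d : PySem.Dict String Int) :
    loopB fuel d [] = (d, []) := by cases fuel <;> rfl

-- balance toolkit
lemma pvBal_append (a b : List Char) : pvBal (a ++ b) = pvBal a + pvBal b := by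
  simp [pvBal, List.count_append]; ring

lemma pvBal_noparen {l : List Char} (h : ∀ c ∈ l, c ≠ '(' ∧ c ≠ ')') : pvBal l = 0 := by
  have h1 : l.count '(' = 0 := List.count_eq_zero.mpr (fun hm => (h _ hm).1 rfl)
  have h2 : l.count ')' = 0 := List.count_eq_zero.mpr (fun hm => (h _ hm).2 rfl)
  simp [pvBal, h1, h2]

-- "starting from running balance k, the balance stays ≥ 0 throughout l"
def pvMinOK (k : Int) (l : List Char) : Prop :=
  ∀ j, j ≤ l.length → 0 ≤ k + pvBal (l.take j)

lemma pvMinOK_mono {k k' : Int} {l : List Char} (hk : k ≤ k') (h : pvMinOK k l) :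
    pvMinOK k' l := by
  intro j hj; have := h j hj; omega

lemma pvMinOK_append {k : Int} {a b : List Char} (ha : pvMinOK k a)
    (hb : pvMinOK (k + pvBal a) b) : pvMinOK k (a ++ b) := by
  intro j hj
  rw [List.take_append, pvBal]
  by_cases h : j ≤ a.length
  · have : j - a.length = 0 := by omega
    rw [this]; simpa [pvBal] using ha j h
  · have : a.take j = a := List.take_of_length_le (by omega)
    rw [this]
    have := hb (j - a.length) (by simp at hj; omega)
    simp [pvBal, List.count_append] at this ⊢; omega

lemma pvMinOK_noparen {k : Int} {l : List Char} (h : ∀ c ∈ l, c ≠ '(' ∧ c ≠ ')')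
    (hk : 0 ≤ k) : pvMinOK k l := by
  intro j hj
  have : pvBal (l.take j) = 0 :=
    pvBal_noparen (fun c hc => h c (List.take_subset j l hc))
  omega

-- scanned runs contain no parentheses
lemma noparen_digit {l : List Char} : ∀ c ∈ l.takeWhile PySem.Chars.isdigit, c ≠ '(' ∧ c ≠ ')' := by
  intro c hc
  have hd := List.mem_takeWhile_imp hc
  constructor <;> rintro rfl <;> simp [PySem.Chars.isdigit] at hd

lemma noparen_lower {l : List Char} : ∀ c ∈ l.takeWhile PySem.Chars.islower, c ≠ '(' ∧ c ≠ ')' := by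
  intro c hc
  have hd := List.mem_takeWhile_imp hc
  constructor <;> rintro rfl <;> simp [PySem.Chars.islower] at hd

lemma pvMinOK_singleton {k : Int} (c : Char) (h0 : 0 ≤ k) (h1 : 0 ≤ k + pvBal [c]) :
    pvMinOK k [c] := by
  intro j hj
  simp at hj
  rcases Nat.le_one_iff_eq_zero_or_eq_one.mp hj with rfl | rfl
  · simpa [pvBal] using h0
  · simpa using h1

-- B's parser consumes a prefix that never dips below balance 0 and stops only at end
-- of input or at a ')' closing balance 0
lemma loopB_decomp : ∀ fuel : Nat, ∀ l : List Char, ∀ d : PySem.Dict String Int,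
    l.length ≤ fuel →
    ∃ pre, l = pre ++ (loopB fuel d l).2 ∧ pvMinOK 0 pre ∧
      ((loopB fuel d l).2 ≠ [] → pvBal pre = 0 ∧ ∃ rr, (loopB fuel d l).2 = ')' :: rr) := by
  intro fuel
  induction fuel with
  | zero =>
    intro l d h
    have hl : l = [] := List.eq_nil_of_length_eq_zero (by omega)
    subst hl
    exact ⟨[], by simp [loopB_nil], fun j hj => by simp at hj; simp [hj, pvBal], by simp [loopB_nil]⟩
  | succ fuel IH =>
    intro l d h
    match l with
    | [] =>
      exact ⟨[], by simp [loopB_nil], fun j hj => by simp at hj; simp [hj, pvBal], by simp [loopB_nil]⟩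
    | c :: rest =>
      by_cases hc : c = ')'
      · subst hc
        refine ⟨[], by simp [loopB], fun j hj => by simp at hj; simp [hj, pvBal], ?_⟩
        intro _
        exact ⟨by decide, rest, by simp [loopB]⟩
      · by_cases hp : c = '('
        · subst hp
          have hstep : loopB (fuel + 1) d ('(' :: rest) =
              (let inner := loopB fuel PySem.Dict.empty rest
               let rem1 := if inner.2.isEmpty then inner.2 else inner.2.tail
               let ds := rem1.takeWhile PySem.Chars.isdigit
               let rem2 := rem1.dropWhile PySem.Chars.isdigit
               loopB fuel (pvMerge d inner.1 (pvMult ds)) rem2) := rfl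
          obtain ⟨pre1, he1, hm1, h31⟩ := IH rest PySem.Dict.empty (by simpa using h)
          by_cases hrem : (loopB fuel PySem.Dict.empty rest).2 = []
          · rw [hrem, List.append_nil] at he1
            refine ⟨'(' :: rest, ?_, ?_, ?_⟩
            · simp [hstep, hrem, loopB_nil]
            · have : ('(' :: rest) = ['('] ++ pre1 := by rw [← he1]; rfl
              rw [this]
              exact pvMinOK_append (pvMinOK_singleton _ le_rfl (by decide))
                (pvMinOK_mono (by simp [pvBal]) hm1)
            · simp [hstep, hrem, loopB_nil]
          · obtain ⟨hbal1, rr, hrr⟩ := h31 hrem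
            have hlen_rem : (loopB fuel PySem.Dict.empty rest).2.length ≤ rest.length := by
              have := congrArg List.length he1
              simp at this
              omega
            set ds := rr.takeWhile PySem.Chars.isdigit with hds
            set rem2 := rr.dropWhile PySem.Chars.isdigit with hrem2
            have hrr_split : rr = ds ++ rem2 := (List.takeWhile_append_dropWhile).symm
            have hlen2 : rem2.length ≤ fuel := by
              have h1 : rem2.length ≤ rr.length := List.length_dropWhile_le _ _
              have h2 : rr.length + 1 = (loopB fuel PySem.Dict.empty rest).2.length := by
                rw [hrr]; rfl
              simp at h
              omega
            have hstep2 : loopB (fuel + 1) d ('(' :: rest) =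
                loopB fuel (pvMerge d (loopB fuel PySem.Dict.empty rest).1 (pvMult ds)) rem2 := by
              rw [hstep]
              simp only [hrr]
              rfl
            obtain ⟨pre2, he2, hm2, h32⟩ :=
              IH rem2 (pvMerge d (loopB fuel PySem.Dict.empty rest).1 (pvMult ds)) hlen2
            refine ⟨'(' :: pre1 ++ ')' :: ds ++ pre2, ?_, ?_, ?_⟩
            · rw [hstep2]
              conv_lhs => rw [he1, hrr, hrr_split, he2]
              simp
            · have hshape : ('(' :: pre1 ++ ')' :: ds ++ pre2) =
                  (['('] ++ pre1) ++ ([')'] ++ (ds ++ pre2)) := by simp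
              rw [hshape]
              refine pvMinOK_append (pvMinOK_append (pvMinOK_singleton _ le_rfl (by decide))
                (pvMinOK_mono (by simp [pvBal]) hm1)) ?_
              have hb1 : pvBal (['('] ++ pre1) = 1 := by
                rw [pvBal_append, hbal1]; decide
              rw [hb1]
              refine pvMinOK_append (pvMinOK_singleton _ (by norm_num) (by decide)) ?_
              have hb2 : (0 : Int) + 1 + pvBal [')'] = 0 := by decide
              rw [hb2]
              exact pvMinOK_append (pvMinOK_noparen noparen_digit le_rfl)
                (by rw [pvBal_noparen noparen_digit]; simpa using hm2)
            · rw [hstep2]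
              intro hne
              obtain ⟨hbal2, rrf, hrrf⟩ := h32 hne
              refine ⟨?_, rrf, hrrf⟩
              have : pvBal ('(' :: pre1 ++ ')' :: ds ++ pre2) =
                  pvBal ['('] + pvBal pre1 + pvBal [')'] + pvBal ds + pvBal pre2 := by
                simp [pvBal, List.count_append]; ring
              rw [this, hbal1, hbal2, pvBal_noparen noparen_digit]
              decide
        · set ls := rest.takeWhile PySem.Chars.islower with hls
          set rest1 := rest.dropWhile PySem.Chars.islower with hrest1
          set ds := rest1.takeWhile PySem.Chars.isdigit with hds
          set rest2 := rest1.dropWhile PySem.Chars.isdigit with hrest2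
          have hstep : loopB (fuel + 1) d (c :: rest) =
              loopB fuel (pvAdd d (String.ofList (c :: ls)) (pvMult ds)) rest2 := by
            simp only [loopB, if_neg hc, if_neg hp]
            rfl
          have hsplit1 : rest = ls ++ rest1 := (List.takeWhile_append_dropWhile).symm
          have hsplit2 : rest1 = ds ++ rest2 := (List.takeWhile_append_dropWhile).symm
          have hlen2 : rest2.length ≤ fuel := by
            have h1 : rest2.length ≤ rest1.length := List.length_dropWhile_le _ _
            have h2 : rest1.length ≤ rest.length := List.length_dropWhile_le _ _
            simp at h
            omega
          obtain ⟨pre3, he3, hm3, h33⟩ :=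
            IH rest2 (pvAdd d (String.ofList (c :: ls)) (pvMult ds)) hlen2
          have hnp : ∀ x ∈ c :: ls ++ ds, x ≠ '(' ∧ x ≠ ')' := by
            intro x hx
            rcases List.mem_cons.mp hx with rfl | hx'
            · exact ⟨hp, hc⟩
            · rcases List.mem_append.mp hx' with h' | h'
              · exact noparen_lower x h'
              · exact noparen_digit x h'
          refine ⟨c :: ls ++ ds ++ pre3, ?_, ?_, ?_⟩
          · rw [hstep]
            conv_lhs => rw [hsplit1, hsplit2, he3]
            simp
          · have hshape : (c :: ls ++ ds ++ pre3) = (c :: ls ++ ds) ++ pre3 := by simp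
            rw [hshape]
            exact pvMinOK_append (pvMinOK_noparen hnp le_rfl)
              (by rw [pvBal_noparen hnp]; simpa using hm3)
          · rw [hstep]
            intro hne
            obtain ⟨hbal3, rrf, hrrf⟩ := h33 hne
            refine ⟨?_, rrf, hrrf⟩
            have hshape : (c :: ls ++ ds ++ pre3) = (c :: ls ++ ds) ++ pre3 := by simp
            rw [hshape, pvBal_append, pvBal_noparen hnp, hbal3]
            decide

lemma loopB_rem_len {fuel : Nat} {l : List Char} {d : PySem.Dict String Int}
    (h : l.length ≤ fuel) : (loopB fuel d l).2.length ≤ l.length := by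
  obtain ⟨pre, hpre, -, -⟩ := loopB_decomp fuel l d h
  have := congrArg List.length hpre; simp at this; omega

lemma loopB_rem_ne_nil {fuel : Nat} {l : List Char} {d : PySem.Dict String Int}
    (h : l.length ≤ fuel) (hd : ∃ j, j ≤ l.length ∧ pvBal (l.take j) < 0) :
    (loopB fuel d l).2 ≠ [] := by
  intro h0
  obtain ⟨pre, hpre, hmin, -⟩ := loopB_decomp fuel l d h
  rw [h0, List.append_nil] at hpre
  subst hpre
  obtain ⟨j, hj, hneg⟩ := hd
  have := hmin j hj
  omega

-- the result of either loop does not depend on the fuel once it covers the input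
lemma loopB_fuel : ∀ N : Nat, ∀ l : List Char, l.length ≤ N →
    ∀ f f' : Nat, ∀ d : PySem.Dict String Int, l.length ≤ f → l.length ≤ f' →
    loopB f d l = loopB f' d l := by
  intro N
  induction N with
  | zero =>
    intro l hl f f' d hf hf'
    have : l = [] := List.eq_nil_of_length_eq_zero (by omega)
    subst this
    simp [loopB_nil]
  | succ N IH =>
    intro l hl f f' d hf hf'
    match l with
    | [] => simp [loopB_nil]
    | c :: rest =>
      simp at hl hf hf'
      obtain ⟨g, rfl⟩ : ∃ g, f = g + 1 := ⟨f - 1, by omega⟩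
      obtain ⟨g', rfl⟩ : ∃ g', f' = g' + 1 := ⟨f' - 1, by omega⟩
      by_cases hc : c = ')'
      · subst hc; rfl
      · by_cases hp : c = '('
        · subst hp
          have h1 : loopB g PySem.Dict.empty rest = loopB g' PySem.Dict.empty rest :=
            IH rest (by omega) g g' _ (by omega) (by omega)
          have e1 : loopB (g + 1) d ('(' :: rest) =
              (let inner := loopB g PySem.Dict.empty rest
               let rem1 := if inner.2.isEmpty then inner.2 else inner.2.tail
               loopB g (pvMerge d inner.1 (pvMult (rem1.takeWhile PySem.Chars.isdigit)))
                 (rem1.dropWhile PySem.Chars.isdigit)) := rfl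
          have e2 : loopB (g' + 1) d ('(' :: rest) =
              (let inner := loopB g' PySem.Dict.empty rest
               let rem1 := if inner.2.isEmpty then inner.2 else inner.2.tail
               loopB g' (pvMerge d inner.1 (pvMult (rem1.takeWhile PySem.Chars.isdigit)))
                 (rem1.dropWhile PySem.Chars.isdigit)) := rfl
          rw [e1, e2, h1]
          simp only []
          set rem := (loopB g' PySem.Dict.empty rest).2 with hrem
          have hremlen : rem.length ≤ rest.length := loopB_rem_len (by omega)
          set rem1 := if rem.isEmpty then rem else rem.tail with hrem1
          have hrem1len : rem1.length ≤ rem.length := by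
            rw [hrem1]; cases rem <;> simp
          have hXlen : (rem1.dropWhile PySem.Chars.isdigit).length ≤ rem1.length :=
            List.length_dropWhile_le _ _
          exact IH _ (by omega) g g' _ (by omega) (by omega)
        · have e1 : loopB (g + 1) d (c :: rest) =
              loopB g (pvAdd d (String.ofList (c :: rest.takeWhile PySem.Chars.islower))
                (pvMult ((rest.dropWhile PySem.Chars.islower).takeWhile PySem.Chars.isdigit)))
                ((rest.dropWhile PySem.Chars.islower).dropWhile PySem.Chars.isdigit) := by
            simp only [loopB, if_neg hc, if_neg hp]
          have e2 : loopB (g' + 1) d (c :: rest) =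
              loopB g' (pvAdd d (String.ofList (c :: rest.takeWhile PySem.Chars.islower))
                (pvMult ((rest.dropWhile PySem.Chars.islower).takeWhile PySem.Chars.isdigit)))
                ((rest.dropWhile PySem.Chars.islower).dropWhile PySem.Chars.isdigit) := by
            simp only [loopB, if_neg hc, if_neg hp]
          rw [e1, e2]
          have h1 : ((rest.dropWhile PySem.Chars.islower).dropWhile PySem.Chars.isdigit).length ≤
              rest.length := by
            have := List.length_dropWhile_le PySem.Chars.islower rest
            have := List.length_dropWhile_le PySem.Chars.isdigit (rest.dropWhile PySem.Chars.islower)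
            omega
          exact IH _ (by omega) g g' _ (by omega) (by omega)

lemma loopA_fuel : ∀ N : Nat, ∀ l : List Char, l.length ≤ N →
    ∀ f f' : Nat, ∀ stack : List (PySem.Dict String Int), l.length ≤ f → l.length ≤ f' →
    loopA f stack l = loopA f' stack l := by
  intro N
  induction N with
  | zero =>
    intro l hl f f' stack hf hf'
    have : l = [] := List.eq_nil_of_length_eq_zero (by omega)
    subst this
    simp [loopA_nil]
  | succ N IH =>
    intro l hl f f' stack hf hf'
    match l with
    | [] => simp [loopA_nil]
    | c :: rest =>
      simp at hl hf hf'
      obtain ⟨g, rfl⟩ : ∃ g, f = g + 1 := ⟨f - 1, by omega⟩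
      obtain ⟨g', rfl⟩ : ∃ g', f' = g' + 1 := ⟨f' - 1, by omega⟩
      by_cases hp : c = '('
      · subst hp
        show loopA g (PySem.Dict.empty :: stack) rest = loopA g' (PySem.Dict.empty :: stack) rest
        exact IH rest (by omega) g g' _ (by omega) (by omega)
      · by_cases hc : c = ')'
        · subst hc
          have hd2 : ((rest.dropWhile PySem.Chars.isdigit)).length ≤ rest.length :=
            List.length_dropWhile_le _ _
          match stack with
          | [] => rfl
          | top :: stack' =>
            match stack' with
            | [] =>
              show (if top.items.isEmpty then loopA g [] (rest.dropWhile PySem.Chars.isdigit) else []) =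
                (if top.items.isEmpty then loopA g' [] (rest.dropWhile PySem.Chars.isdigit) else [])
              rw [IH (rest.dropWhile PySem.Chars.isdigit) (by omega) g g' [] (by omega) (by omega)]
            | low :: below =>
              show loopA g _ (rest.dropWhile PySem.Chars.isdigit) =
                loopA g' _ (rest.dropWhile PySem.Chars.isdigit)
              exact IH _ (by omega) g g' _ (by omega) (by omega)
        · have hd1 : ((rest.dropWhile PySem.Chars.islower).dropWhile PySem.Chars.isdigit).length ≤
              rest.length := by
            have := List.length_dropWhile_le PySem.Chars.islower rest
            have := List.length_dropWhile_le PySem.Chars.isdigit (rest.dropWhile PySem.Chars.islower)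
            omega
          match stack with
          | [] =>
            have e1 : loopA (g + 1) [] (c :: rest) = [] := by
              simp only [loopA, if_neg hp, if_neg hc]
            have e2 : loopA (g' + 1) [] (c :: rest) = [] := by
              simp only [loopA, if_neg hp, if_neg hc]
            rw [e1, e2]
          | top :: stack' =>
            have e1 : loopA (g + 1) (top :: stack') (c :: rest) =
                loopA g (pvAdd top (String.ofList (c :: rest.takeWhile PySem.Chars.islower))
                    (pvMult ((rest.dropWhile PySem.Chars.islower).takeWhile PySem.Chars.isdigit)) :: stack')
                  ((rest.dropWhile PySem.Chars.islower).dropWhile PySem.Chars.isdigit) := by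
              simp only [loopA, if_neg hp, if_neg hc]
            have e2 : loopA (g' + 1) (top :: stack') (c :: rest) =
                loopA g' (pvAdd top (String.ofList (c :: rest.takeWhile PySem.Chars.islower))
                    (pvMult ((rest.dropWhile PySem.Chars.islower).takeWhile PySem.Chars.isdigit)) :: stack')
                  ((rest.dropWhile PySem.Chars.islower).dropWhile PySem.Chars.isdigit) := by
              simp only [loopA, if_neg hp, if_neg hc]
            rw [e1, e2]
            exact IH _ (by omega) g g' _ (by omega) (by omega)

-- "every '(' in l is eventually matched": after any '(' the running balance dips
def pvNoUnm (l : List Char) : Prop :=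
  ∀ pre suf, l = pre ++ '(' :: suf → ∃ j, j ≤ suf.length ∧ pvBal (suf.take j) < 0

lemma pvNoUnm_suffix {a b : List Char} (h : pvNoUnm (a ++ b)) : pvNoUnm b := by
  intro pre suf he; exact h (a ++ pre) suf (by rw [he, List.append_assoc])

-- A's stack step run on l equals B's parse of l followed by A's treatment of the
-- unconsumed remainder
lemma loopA_eq_close : ∀ N : Nat, ∀ l : List Char, l.length ≤ N →
    ∀ fuel : Nat, ∀ d : PySem.Dict String Int, ∀ stack, l.length ≤ fuel → pvNoUnm l →
    loopA fuel (d :: stack) l =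
      (if (loopB fuel d l).2.isEmpty then (loopB fuel d l).1 :: stack
       else loopA (loopB fuel d l).2.length ((loopB fuel d l).1 :: stack) (loopB fuel d l).2) := by
  intro N
  induction N with
  | zero =>
    intro l hlN fuel d stack hf hno
    have : l = [] := List.eq_nil_of_length_eq_zero (by omega)
    subst this
    simp [loopA_nil, loopB_nil]
  | succ N IH =>
    intro l hlN fuel d stack hf hno
    match l with
    | [] => simp [loopA_nil, loopB_nil]
    | c :: rest =>
      simp at hlN hf
      obtain ⟨g, rfl⟩ : ∃ g, fuel = g + 1 := ⟨fuel - 1, by omega⟩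
      by_cases hc : c = ')'
      · subst hc
        have e0 : loopB (g + 1) d (')' :: rest) = (d, ')' :: rest) := rfl
        rw [e0]
        simp only [List.isEmpty_cons, List.length_cons, Bool.false_eq_true, if_false]
        exact loopA_fuel (rest.length + 1) _ (by simp) (g + 1) (rest.length + 1) _
          (by simp; omega) (by simp)
      · by_cases hp : c = '('
        · subst hp
          have e0 : loopA (g + 1) (d :: stack) ('(' :: rest) =
              loopA g (PySem.Dict.empty :: d :: stack) rest := rfl
          have hnor : pvNoUnm rest := pvNoUnm_suffix (a := ['(']) hno
          have hih1 := IH rest (by omega) g PySem.Dict.empty (d :: stack) (by omega) hnor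
          have hdip : ∃ j, j ≤ rest.length ∧ pvBal (rest.take j) < 0 := by
            obtain ⟨j, hj, hneg⟩ := hno [] rest rfl
            exact ⟨j, hj, hneg⟩
          have hne : (loopB g PySem.Dict.empty rest).2 ≠ [] :=
            loopB_rem_ne_nil (by omega) hdip
          obtain ⟨pre1, he1, hm1, h31⟩ := loopB_decomp g rest PySem.Dict.empty (by omega)
          obtain ⟨hbal1, rr, hrr⟩ := h31 hne
          rw [hrr] at hih1
          simp only [List.isEmpty_cons, List.length_cons, Bool.false_eq_true, if_false] at hih1
          have e1 : loopA (rr.length + 1) ((loopB g PySem.Dict.empty rest).1 :: d :: stack)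
              (')' :: rr) =
              loopA rr.length
                (pvMerge d (loopB g PySem.Dict.empty rest).1
                    (pvMult (rr.takeWhile PySem.Chars.isdigit)) :: stack)
                (rr.dropWhile PySem.Chars.isdigit) := rfl
          rw [e1] at hih1
          set ds := rr.takeWhile PySem.Chars.isdigit with hds
          set rem2 := rr.dropWhile PySem.Chars.isdigit with hrem2
          have hrr_split : rr = ds ++ rem2 := (List.takeWhile_append_dropWhile).symm
          have hremlen : rr.length + 1 ≤ rest.length := by
            have := congrArg List.length he1
            rw [hrr] at this
            simp at this
            omega
          have hlen2 : rem2.length ≤ rr.length := List.length_dropWhile_le _ _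
          have hnor2 : pvNoUnm rem2 := by
            refine pvNoUnm_suffix (a := '(' :: pre1 ++ ')' :: ds) ?_
            have : ('(' :: pre1 ++ ')' :: ds) ++ rem2 = '(' :: rest := by
              conv_rhs => rw [he1, hrr, hrr_split]
              simp
            rw [this]
            exact hno
          have hih2 := IH rem2 (by omega) rr.length
            (pvMerge d (loopB g PySem.Dict.empty rest).1 (pvMult ds)) stack (by omega) hnor2
          rw [hih2] at hih1
          have e2 : loopB (g + 1) d ('(' :: rest) =
              loopB g (pvMerge d (loopB g PySem.Dict.empty rest).1 (pvMult ds)) rem2 := by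
            show (let inner := loopB g PySem.Dict.empty rest
                  let rem1 := if inner.2.isEmpty then inner.2 else inner.2.tail
                  let ds' := rem1.takeWhile PySem.Chars.isdigit
                  let rem2' := rem1.dropWhile PySem.Chars.isdigit
                  loopB g (pvMerge d inner.1 (pvMult ds')) rem2') = _
            simp only [hrr]
            rfl
          have e3 : loopB rr.length (pvMerge d (loopB g PySem.Dict.empty rest).1 (pvMult ds)) rem2 =
              loopB g (pvMerge d (loopB g PySem.Dict.empty rest).1 (pvMult ds)) rem2 :=
            loopB_fuel rem2.length _ le_rfl rr.length g _ (by omega) (by omega)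
          rw [e0, hih1, e3, e2]
        · set ls := rest.takeWhile PySem.Chars.islower with hls
          set rest1 := rest.dropWhile PySem.Chars.islower with hrest1
          set ds := rest1.takeWhile PySem.Chars.isdigit with hds
          set rest2 := rest1.dropWhile PySem.Chars.isdigit with hrest2
          have e1 : loopA (g + 1) (d :: stack) (c :: rest) =
              loopA g (pvAdd d (String.ofList (c :: ls)) (pvMult ds) :: stack) rest2 := by
            simp only [loopA, if_neg hp, if_neg hc]
            rfl
          have e2 : loopB (g + 1) d (c :: rest) =
              loopB g (pvAdd d (String.ofList (c :: ls)) (pvMult ds)) rest2 := by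
            simp only [loopB, if_neg hc, if_neg hp]
            rfl
          have hsplit1 : rest = ls ++ rest1 := (List.takeWhile_append_dropWhile).symm
          have hsplit2 : rest1 = ds ++ rest2 := (List.takeWhile_append_dropWhile).symm
          have hlen2 : rest2.length ≤ rest.length := by
            have h1 : rest2.length ≤ rest1.length := List.length_dropWhile_le _ _
            have h2 : rest1.length ≤ rest.length := List.length_dropWhile_le _ _
            omega
          have hnor2 : pvNoUnm rest2 := by
            refine pvNoUnm_suffix (a := c :: ls ++ ds) ?_
            have : (c :: ls ++ ds) ++ rest2 = c :: rest := by
              conv_rhs => rw [hsplit1, hsplit2]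
              simp
            rw [this]
            exact hno
          rw [e1, e2]
          exact IH rest2 (by omega) g _ stack (by omega) hnor2

-- ===== VERDICT (by name: the statement is the Claim_ definition above) =====
theorem countOfAtoms2_spec : Claim_equal_countOfAtoms2 := by
  intro f _ hpre
  unfold Spec_countOfAtoms2 countOfAtoms2 countOfAtoms2_alt
  obtain ⟨hbal, hmin⟩ := hpre
  have hNoUnm : pvNoUnm f.toList := by
    intro pre suf he
    refine ⟨suf.length, le_rfl, ?_⟩
    rw [List.take_length]
    have h1 : pvBal f.toList = pvBal pre + 1 + pvBal suf := by
      rw [he]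
      have : pre ++ '(' :: suf = (pre ++ ['(']) ++ suf := by simp
      rw [this, pvBal_append, pvBal_append]
      have : pvBal ['('] = 1 := by decide
      omega
    have h2 : 0 ≤ pvBal pre := by
      have hb := hmin pre.length (by rw [he]; simp)
      have ht : f.toList.take pre.length = pre := by
        rw [he, List.take_append]
        simp
      rwa [ht] at hb
    omega
  have hrem : (loopB f.toList.length PySem.Dict.empty f.toList).2 = [] := by
    by_contra hne
    obtain ⟨pre, he, hm, h3⟩ :=
      loopB_decomp f.toList.length f.toList PySem.Dict.empty le_rfl
    obtain ⟨hbalpre, rr, hrr⟩ := h3 hne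
    rw [hrr] at he
    have hlen : pre.length + 1 ≤ f.toList.length := by
      have := congrArg List.length he
      simp only [List.length_append, List.length_cons] at this
      omega
    have hb := hmin (pre.length + 1) (by omega)
    have ht : f.toList.take (pre.length + 1) = pre ++ [')'] := by
      rw [he]
      have : pre ++ ')' :: rr = (pre ++ [')']) ++ rr := by simp
      rw [this, List.take_append]
      have h0 : pre.length + 1 - (pre ++ [')']).length = 0 := by simp
      rw [h0]
      simp [List.take_of_length_le]
    rw [ht, pvBal_append] at hb
    have : pvBal [')'] = -1 := by decide
    omega
  have hmain := loopA_eq_close f.toList.length f.toList le_rfl f.toList.length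
    PySem.Dict.empty [] le_rfl hNoUnm
  rw [hrem] at hmain
  simp only [List.isEmpty_nil, if_true] at hmain
  rw [hmain]
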